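-- pv_equiv track=rewrite | github.com/WiktoriaD/everybody-codes | day7.py | calculated_plans
-- ===== SOURCE A (Python) =====
-- def calculated_plans(dictionary, initial_power=10):
--     results = {}
--     for key, value in dictionary.items():
--         power = initial_power
--         total_power = 0
--         for action in value:
--             if action == "+":
--                 power += 1
--             elif action == "-":
--                 power -= 1
--             total_power += power
--         results[key] = total_power
--     return results
-- ===== SOURCE B (Python) =====
-- def calculated_plans(dictionary, initial_power=10):
--     # A '+'/'-' at index i permanently shifts power for positions i..n-1, so it
--     # contributes +-(n - i); the base power contributes initial_power * n.
--     def total(value):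
--         n = len(value)
--         return initial_power * n + sum(
--             n - i if a == "+" else i - n if a == "-" else 0
--             for i, a in enumerate(value))
--     return {key: total(value) for key, value in dictionary.items()}
-- ===== Notes on version B (the rewrite author's own statement) =====
-- stated objective: alternative
-- what changed: Replaces A's stateful inner loop (running power + running total folded into repeated dict inserts) by a closed-form per-key expression: total = initial_power*n plus the sum over enumerate(value) of +-(n-i) per '+'/'-', assembled with a dict comprehension.
import Mathlib
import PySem

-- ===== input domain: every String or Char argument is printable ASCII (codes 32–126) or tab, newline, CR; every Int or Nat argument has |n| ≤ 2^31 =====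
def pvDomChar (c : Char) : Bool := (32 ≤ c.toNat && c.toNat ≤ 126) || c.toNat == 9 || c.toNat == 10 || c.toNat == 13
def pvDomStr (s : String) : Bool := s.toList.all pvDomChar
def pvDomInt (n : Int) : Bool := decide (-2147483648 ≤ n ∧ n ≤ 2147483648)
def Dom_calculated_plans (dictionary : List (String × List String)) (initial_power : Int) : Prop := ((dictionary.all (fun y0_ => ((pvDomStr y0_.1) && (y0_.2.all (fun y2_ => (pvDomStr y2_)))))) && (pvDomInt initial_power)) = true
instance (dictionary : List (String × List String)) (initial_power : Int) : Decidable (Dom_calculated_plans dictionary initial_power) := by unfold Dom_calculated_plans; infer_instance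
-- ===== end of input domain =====

-- B replaces A's stateful inner loop (running power + running total, folded into repeated
-- dict inserts) by a closed-form per-key sum over enumerate plus a dict comprehension; alternative decomposition, same cost.

-- ===== PORT A =====
-- inner loop state: (power, total_power)
def pvStepA (st : Int × Int) (action : String) : Int × Int :=
  let power := if action = "+" then st.1 + 1 else if action = "-" then st.1 - 1 else st.1
  (power, st.2 + power)

def calculated_plans (dictionary : List (String × List String)) (initial_power : Int) : List (String × Int) :=
  (dictionary.foldl
    (fun results kv => results.insert kv.1 ((kv.2.foldl pvStepA (initial_power, 0)).2))
    PySem.Dict.empty).items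

-- ===== PORT B =====
-- contribution of the action at (index, action): a '+'/'-' at index i shifts all n - i later sums
def pvContrib (n : Int) (p : Int × String) : Int :=
  if p.2 = "+" then n - p.1 else if p.2 = "-" then p.1 - n else 0

-- Source B's helper 'total': initial_power * n + sum(... for i, a in enumerate(value))
def pvTotalB (initial_power : Int) (value : List String) : Int :=
  let n : Int := value.length
  initial_power * n + ((PySem.List.enumerate value 0).map (pvContrib n)).sum

-- the dict comprehension {key: total(value) for key, value in dictionary.items()}
def calculated_plans_alt (dictionary : List (String × List String)) (initial_power : Int) : List (String × Int) :=
  (PySem.Dict.ofList (dictionary.map (fun kv => (kv.1, pvTotalB initial_power kv.2)))).items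

-- ===== PRECONDITION & SPEC =====
def Spec_calculated_plans (dictionary : List (String × List String)) (initial_power : Int) (out : List (String × Int)) : Prop := out = calculated_plans_alt dictionary initial_power
instance (dictionary : List (String × List String)) (initial_power : Int) (out : List (String × Int)) : Decidable (Spec_calculated_plans dictionary initial_power out) := by unfold Spec_calculated_plans; infer_instance

-- ===== CLAIM =====
def Claim_equal_calculated_plans : Prop := ∀ (dictionary : List (String × List String)) (initial_power : Int), Dom_calculated_plans dictionary initial_power → Spec_calculated_plans dictionary initial_power (calculated_plans dictionary initial_power)

-- ===== LEMMAS AND PROOFS =====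

-- shifting the enumerate start together with n leaves each contribution unchanged
theorem pvContrib_shift (v : List String) (s n : Int) :
    ((PySem.List.enumerate v (s + 1)).map (pvContrib (n + 1))).sum
      = ((PySem.List.enumerate v s).map (pvContrib n)).sum := by
  induction v generalizing s with
  | nil => simp [PySem.List.enumerate]
  | cons a v ih =>
    rw [PySem.List.enumerate_cons, PySem.List.enumerate_cons]
    simp only [List.map_cons, List.sum_cons, ih (s + 1)]
    unfold pvContrib
    split_ifs <;> ring_nf

-- A's inner fold value equals B's closed form (linear in the starting total t)
theorem pvInner_eq (v : List String) (p t : Int) :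
    (v.foldl pvStepA (p, t)).2 = t + pvTotalB p v := by
  induction v generalizing p t with
  | nil => simp [pvTotalB, PySem.List.enumerate]
  | cons a v ih =>
    simp only [List.foldl_cons, pvStepA, pvTotalB, PySem.List.enumerate_cons,
      List.map_cons, List.sum_cons, List.length_cons] at *
    have hcast : ((v.length + 1 : Nat) : Int) = (v.length : Int) + 1 := by push_cast; ring
    split_ifs with h1 h2
    · rw [ih (p + 1) (t + (p + 1)), hcast,
        pvContrib_shift v 0 (v.length : Int), pvContrib, if_pos h1]
      ring
    · rw [ih (p - 1) (t + (p - 1)), hcast,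
        pvContrib_shift v 0 (v.length : Int), pvContrib, if_neg h1, if_pos h2]
      ring
    · rw [ih p (t + p), hcast,
        pvContrib_shift v 0 (v.length : Int), pvContrib, if_neg h1, if_neg h2]
      ring

-- Dict.ofList of a mapped list is the fold of inserts A performs
theorem pvOfList_map_eq (dictionary : List (String × List String)) (ip : Int) :
    PySem.Dict.ofList (dictionary.map (fun kv => (kv.1, pvTotalB ip kv.2)))
      = dictionary.foldl
          (fun results kv => results.insert kv.1 ((kv.2.foldl pvStepA (ip, 0)).2))
          PySem.Dict.empty := by
  have hof : PySem.Dict.ofList (dictionary.map (fun kv => (kv.1, pvTotalB ip kv.2)))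
      = (dictionary.map (fun kv => (kv.1, pvTotalB ip kv.2))).foldl
          (fun d p => d.insert p.1 p.2) PySem.Dict.empty := rfl
  rw [hof, List.foldl_map]
  have hfun : (fun (d : PySem.Dict String Int) (kv : String × List String) =>
        d.insert (kv.1, pvTotalB ip kv.2).1 (kv.1, pvTotalB ip kv.2).2)
      = fun results kv => results.insert kv.1 ((kv.2.foldl pvStepA (ip, 0)).2) := by
    funext d kv
    rw [pvInner_eq kv.2 ip 0]
    simp
  rw [hfun]

-- ===== VERDICT =====
theorem calculated_plans_spec : Claim_equal_calculated_plans := by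
  intro dictionary initial_power _
  unfold Spec_calculated_plans calculated_plans calculated_plans_alt
  rw [pvOfList_map_eq]
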